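-- pv_equiv track=rewrite | github.com/Quick-One/CC | misc/AOC2023/day_14.py | shift_row_left
-- ===== SOURCE A (Python) =====
-- def shift_row_left(row):
--     stone = []
--     for i,e in enumerate(row):
--         if e == 'O':
--             stone.append(i)
--     stone = stone[::-1]
--     while stone:
--         x = stone.pop()
--         if x != 0 and row[x-1] == '.':
--             row[x-1], row[x] = row[x], row[x-1]
--             stone.append(x-1)
--     return row
-- ===== SOURCE B (Python) =====
-- def shift_row_left(row):
--     # One pass: within each maximal run of 'O'/'.' cells (delimited by any
--     # other element), pack the O's to the left followed by the dots.
--     # Note: A mutates its argument in place; B builds a fresh list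
--     # (equivalence is about the return value).
--     out = []
--     o = d = 0
--     for e in row:
--         if e == 'O':
--             o += 1
--         elif e == '.':
--             d += 1
--         else:
--             out.extend(['O'] * o)
--             out.extend(['.'] * d)
--             out.append(e)
--             o = d = 0
--     out.extend(['O'] * o)
--     out.extend(['.'] * d)
--     return out
-- ===== Notes on version B (the rewrite author's own statement) =====
-- stated objective: simpler
-- what changed: Replaces the index-stack simulation that slides each 'O' cell by cell with a single left-to-right pass that counts 'O's and '.'s per blocker-delimited run and emits each run packed; A mutates its argument in place, B builds a fresh list (return values are equal).
import Mathlib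
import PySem

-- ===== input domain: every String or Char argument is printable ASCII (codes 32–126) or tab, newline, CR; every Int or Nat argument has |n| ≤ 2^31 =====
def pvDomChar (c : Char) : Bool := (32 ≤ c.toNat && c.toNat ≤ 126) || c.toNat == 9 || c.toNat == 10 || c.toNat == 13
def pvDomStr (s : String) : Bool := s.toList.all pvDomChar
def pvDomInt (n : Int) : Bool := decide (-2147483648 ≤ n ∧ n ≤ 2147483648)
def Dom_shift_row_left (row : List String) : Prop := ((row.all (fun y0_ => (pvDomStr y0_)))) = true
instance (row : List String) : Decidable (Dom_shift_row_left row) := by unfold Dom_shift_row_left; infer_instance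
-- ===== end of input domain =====

-- B replaces A's stack simulation (sliding each 'O' left one cell at a time) by a
-- single left-to-right pass that packs each blocker-delimited run of 'O'/'.' cells;
-- A mutates `row` in place and B does not — the equivalence proved here is about the
-- RETURN value only.

-- ===== PORT A =====
-- `for i,e in enumerate(row): if e=='O': stone.append(i)`: the ascending list of
-- indices of "O".  Python then reverses `stone` and pops/pushes at the END; we keep
-- the list un-reversed and pop/push at the HEAD — the same stack with its top at the
-- other end, yielding the identical sequence of popped values.  Indices are Nat:
-- every value ever on the stack is a nonnegative in-range index (initial indices are
-- < len(row), and x-1 is only pushed when x ≠ 0), so `getD` never takes its default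
-- where Python would raise.
def pvStones : List String → Nat → List Nat
  | [], _ => []
  | e :: t, i => if e = "O" then i :: pvStones t (i + 1) else pvStones t (i + 1)

-- the `while stone:` loop: pop x; if x != 0 and row[x-1] == '.', swap and push x-1
def pvLoop (row : List String) (stone : List Nat) : List String :=
  match stone with
  | [] => row
  | x :: rest =>
    if h : x ≠ 0 ∧ row.getD (x - 1) "" = "." then
      pvLoop ((row.set (x - 1) (row.getD x "")).set x (row.getD (x - 1) "")) ((x - 1) :: rest)
    else
      pvLoop row rest
termination_by stone.length + stone.sum
decreasing_by
  · simp only [List.length_cons, List.sum_cons]; omega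
  · simp only [List.length_cons, List.sum_cons]; omega

def shift_row_left (row : List String) : List String :=
  pvLoop row (pvStones row 0)

-- ===== PORT B =====
-- Source B's loop: counters o,d for the current 'O'/'.' run, flushed at each blocker.
def pvPack (tail : List String) (out : List String) (o d : Nat) : List String :=
  match tail with
  | [] => out ++ List.replicate o "O" ++ List.replicate d "."
  | e :: t =>
    if e = "O" then pvPack t out (o + 1) d
    else if e = "." then pvPack t out o (d + 1)
    else pvPack t (out ++ List.replicate o "O" ++ List.replicate d "." ++ [e]) 0 0

def shift_row_left_alt (row : List String) : List String :=
  pvPack row [] 0 0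

-- ===== PRECONDITION & SPEC =====
def Spec_shift_row_left (row : List String) (out : List String) : Prop := out = shift_row_left_alt row
instance (row : List String) (out : List String) : Decidable (Spec_shift_row_left row out) := by unfold Spec_shift_row_left; infer_instance

-- ===== CLAIM (what is proved, stated in full; the proofs are below) =====
def Claim_equal_shift_row_left : Prop := ∀ (row : List String), Dom_shift_row_left row → Spec_shift_row_left row (shift_row_left row)

-- ===== LEMMAS AND PROOFS =====

-- a prefix that never lets a rock slide into it: empty, or ending in a blocker
def pvOutOK (out : List String) : Prop := ∀ b, out.getLast? = some b → b ≠ "."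

lemma pv_getD_at (p : List String) (a : String) (t : List String) :
    (p ++ a :: t).getD p.length "" = a := by
  induction p with
  | nil => rfl
  | cons x xs _ => simp

lemma pv_getD_at1 (p : List String) (a b : String) (t : List String) :
    (p ++ a :: b :: t).getD (p.length + 1) "" = b := by
  induction p with
  | nil => rfl
  | cons x xs _ => simp

lemma pv_set_at (p : List String) (a c : String) (t : List String) :
    (p ++ a :: t).set p.length c = p ++ c :: t := by
  induction p with
  | nil => rfl
  | cons x xs _ => simp

lemma pv_set_at1 (p : List String) (a b c : String) (t : List String) :
    (p ++ a :: b :: t).set (p.length + 1) c = p ++ a :: c :: t := by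
  induction p with
  | nil => rfl
  | cons x xs _ => simp

-- sliding one rock all the way across its run of d dots
lemma pv_slide (d : Nat) : ∀ (o : Nat) (out tail : List String) (rest : List Nat),
    pvOutOK out →
    pvLoop (out ++ List.replicate o "O" ++ List.replicate d "." ++ "O" :: tail)
      ((out.length + o + d) :: rest)
    = pvLoop (out ++ List.replicate (o + 1) "O" ++ List.replicate d "." ++ tail) rest := by
  induction d with
  | zero =>
    intro o out tail rest hok
    have hrow : out ++ List.replicate o "O" ++ List.replicate 0 "." ++ "O" :: tail
        = out ++ List.replicate (o + 1) "O" ++ List.replicate 0 "." ++ tail := by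
      simp [List.replicate_succ']
    rw [hrow, pvLoop]
    have hcond : ¬ ((out.length + o + 0 ≠ 0) ∧
        (out ++ List.replicate (o + 1) "O" ++ List.replicate 0 "." ++ tail).getD
          (out.length + o + 0 - 1) "" = ".") := by
      rcases Nat.eq_zero_or_pos o with rfl | ho
      · rcases List.eq_nil_or_concat out with rfl | ⟨q, b, rfl⟩
        · simp
        · simp only [List.concat_eq_append] at hok ⊢
          have hb : b ≠ "." := hok b (by simp)
          have hrw2 : (q ++ [b]) ++ List.replicate (0 + 1) "O" ++ List.replicate 0 "." ++ tail
              = q ++ b :: "O" :: tail := by simp [List.replicate_succ]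
          have hx : (q ++ [b]).length + 0 + 0 - 1 = q.length := by simp
          rw [hrw2, hx, pv_getD_at q b ("O" :: tail)]
          intro hc; exact hb hc.2
      · obtain ⟨o', rfl⟩ : ∃ o', o = o' + 1 := ⟨o - 1, by omega⟩
        have hrw2 : out ++ List.replicate (o' + 1 + 1) "O" ++ List.replicate 0 "." ++ tail
            = (out ++ List.replicate o' "O") ++ "O" :: "O" :: tail := by
          simp [List.replicate_succ', List.append_assoc]
        have hx : out.length + (o' + 1) + 0 - 1 = (out ++ List.replicate o' "O").length := by
          simp
        rw [hrw2, hx, pv_getD_at (out ++ List.replicate o' "O") "O" ("O" :: tail)]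
        intro hc
        exact absurd hc.2 (by decide)
    rw [dif_neg hcond]
  | succ d ih =>
    intro o out tail rest hok
    -- write the row with an explicit prefix of length out.length+o+d
    have hrow : out ++ List.replicate o "O" ++ List.replicate (d + 1) "." ++ "O" :: tail
        = (out ++ List.replicate o "O" ++ List.replicate d ".") ++ "." :: "O" :: tail := by
      simp [List.replicate_succ', List.append_assoc]
    set P := out ++ List.replicate o "O" ++ List.replicate d "." with hP
    have hPl : P.length = out.length + o + d := by
      simp only [hP, List.length_append, List.length_replicate]
    have hx : out.length + o + (d + 1) = P.length + 1 := by omega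
    rw [hrow, hx, pvLoop]
    have hg1 : (P ++ "." :: "O" :: tail).getD (P.length + 1 - 1) "" = "." := by
      simp
    have hg2 : (P ++ "." :: "O" :: tail).getD (P.length + 1) "" = "O" :=
      pv_getD_at1 P "." "O" tail
    rw [dif_pos ⟨by omega, hg1⟩]
    have hset : ((P ++ "." :: "O" :: tail).set (P.length + 1 - 1)
          ((P ++ "." :: "O" :: tail).getD (P.length + 1) "")).set (P.length + 1)
          ((P ++ "." :: "O" :: tail).getD (P.length + 1 - 1) "")
        = P ++ "O" :: "." :: tail := by
      rw [hg1, hg2]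
      have h1 : (P ++ "." :: "O" :: tail).set (P.length + 1 - 1) "O" = P ++ "O" :: "O" :: tail := by
        simp [pv_set_at P "." "O" ("O" :: tail)]
      rw [h1, pv_set_at1 P "O" "O" "." tail]
    rw [hset]
    have h2 : P ++ "O" :: "." :: tail
        = out ++ List.replicate o "O" ++ List.replicate d "." ++ "O" :: "." :: tail := by
      simp [hP, List.append_assoc]
    have h3 : P.length + 1 - 1 = out.length + o + d := by omega
    rw [h2, h3, ih o out ("." :: tail) rest hok]
    have h4 : out ++ List.replicate (o + 1) "O" ++ List.replicate d "." ++ "." :: tail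
        = out ++ List.replicate (o + 1) "O" ++ List.replicate (d + 1) "." ++ tail := by
      simp [List.replicate_succ', List.append_assoc]
    rw [h4]

lemma pv_main (tail : List String) : ∀ (out : List String) (o d : Nat), pvOutOK out →
    pvLoop (out ++ List.replicate o "O" ++ List.replicate d "." ++ tail)
      (pvStones tail (out.length + o + d))
    = pvPack tail out o d := by
  induction tail with
  | nil =>
    intro out o d _
    simp [pvStones, pvLoop, pvPack]
  | cons e t ih =>
    intro out o d hok
    by_cases hO : e = "O"
    · subst hO
      rw [pvPack, if_pos rfl, pvStones, if_pos rfl,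
        pv_slide d o out t (pvStones t (out.length + o + d + 1)) hok]
      have : out.length + o + d + 1 = out.length + (o + 1) + d := by omega
      rw [this, ih out (o + 1) d hok]
    · by_cases hD : e = "."
      · subst hD
        rw [pvPack, if_neg (by decide), if_pos rfl, pvStones, if_neg (by decide)]
        have hrow : out ++ List.replicate o "O" ++ List.replicate d "." ++ "." :: t
            = out ++ List.replicate o "O" ++ List.replicate (d + 1) "." ++ t := by
          simp [List.replicate_succ', List.append_assoc]
        have hn : out.length + o + d + 1 = out.length + o + (d + 1) := by omega
        rw [hrow, hn, ih out o (d + 1) hok]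
      · rw [pvPack, if_neg hO, if_neg hD, pvStones, if_neg hO]
        have hout' : pvOutOK (out ++ List.replicate o "O" ++ List.replicate d "." ++ [e]) := by
          intro b hb
          simp [List.getLast?_append] at hb
          subst hb; exact hD
        have hrow : out ++ List.replicate o "O" ++ List.replicate d "." ++ e :: t
            = (out ++ List.replicate o "O" ++ List.replicate d "." ++ [e])
              ++ List.replicate 0 "O" ++ List.replicate 0 "." ++ t := by
          simp
        have hn : out.length + o + d + 1
            = (out ++ List.replicate o "O" ++ List.replicate d "." ++ [e]).length + 0 + 0 := by
          simp; omega
        rw [hrow, hn, ih (out ++ List.replicate o "O" ++ List.replicate d "." ++ [e]) 0 0 hout']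

-- ===== VERDICT (by name: the statement is the Claim_ definition above) =====
theorem shift_row_left_spec : Claim_equal_shift_row_left := by
  intro row _
  unfold Spec_shift_row_left shift_row_left shift_row_left_alt
  have h := pv_main row [] 0 0 (by intro b hb; simp at hb)
  simpa using h
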